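-- pv_equiv track=rewrite | github.com/ysl-lab/CP_tutorial | 2_production/get_dihedrals.py | get_phiP
-- ===== SOURCE A (Python) =====
-- def get_phiP(num_res,resids,residues,atoms,indexes):
--    phiP=[]
--    for i in range(1,num_res+1):
--       temp=[]
--       for n in range(len(residues)):
--          if resids[n] == i and residues[n] == 'ALA' and atoms[n] == 'H': temp.append(indexes[n])
--          elif resids[n] == i and residues[n] == 'NMA' and atoms[n] == 'CN': temp.append(indexes[n])
--       for n in range(len(residues)):
--          if resids[n] == i and atoms[n] == 'N': temp.append(indexes[n])
--       for n in range(len(residues)):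
--          if resids[n] == i and atoms[n] == 'CA': temp.append(indexes[n])
--       for n in range(len(residues)):
--          if resids[n] == i and atoms[n] == 'C': temp.append(indexes[n])
--       phiP.append(temp)
--    return phiP
-- ===== SOURCE B (Python) =====
-- def get_phiP(num_res, resids, residues, atoms, indexes):
--     # One pass: bucket atom indexes by resid into the four ordered category
--     # lists, then assemble one row per residue id in 1..num_res.
--     buckets = {}
--     for resid, res, atom, idx in zip(resids, residues, atoms, indexes):
--         b = buckets.setdefault(resid, ([], [], [], []))
--         if (res == 'ALA' and atom == 'H') or (res == 'NMA' and atom == 'CN'):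
--             b[0].append(idx)
--         elif atom == 'N':
--             b[1].append(idx)
--         elif atom == 'CA':
--             b[2].append(idx)
--         elif atom == 'C':
--             b[3].append(idx)
--     empty = ([], [], [], [])
--     return [[x for part in buckets.get(i, empty) for x in part]
--             for i in range(1, num_res + 1)]
-- ===== Notes on version B (the rewrite author's own statement) =====
-- stated objective: faster
-- what changed: Replaces the per-residue four full scans of all atoms with a single pass that buckets each atom's index by resid into four ordered category lists, then assembles one row per residue id.
-- outside the precondition, e.g. on get_phiP(1, [5, 5], ['ALA', 'ALA'], ['H'], [7]): A returns [[]], B returns [[]]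
import Mathlib
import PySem

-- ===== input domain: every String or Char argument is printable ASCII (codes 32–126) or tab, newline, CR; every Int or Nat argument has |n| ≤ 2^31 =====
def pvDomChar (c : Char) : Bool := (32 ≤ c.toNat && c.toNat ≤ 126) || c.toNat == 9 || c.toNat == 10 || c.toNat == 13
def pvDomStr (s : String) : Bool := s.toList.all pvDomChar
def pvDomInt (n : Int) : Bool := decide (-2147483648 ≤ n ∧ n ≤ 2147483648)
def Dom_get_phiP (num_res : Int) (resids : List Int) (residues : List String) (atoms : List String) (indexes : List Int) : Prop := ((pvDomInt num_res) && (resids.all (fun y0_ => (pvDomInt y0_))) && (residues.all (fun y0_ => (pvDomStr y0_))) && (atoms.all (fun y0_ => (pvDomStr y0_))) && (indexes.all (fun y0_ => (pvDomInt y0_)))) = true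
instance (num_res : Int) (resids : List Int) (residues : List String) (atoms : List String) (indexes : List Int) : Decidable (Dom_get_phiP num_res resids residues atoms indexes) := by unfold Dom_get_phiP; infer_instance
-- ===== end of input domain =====

-- B replaces A's four full scans per residue id with one bucketing pass over the atoms followed by assembly.

-- ===== PORT A =====
-- first inner loop of A (the if/elif over ALA-H / NMA-CN), appending to temp
def pvLoop1 (resids : List Int) (residues : List String) (atoms : List String) (indexes : List Int) (i : Int) (temp : List Int) : List Int :=
  (PySem.List.pyRange 0 (residues.length : Int) 1).foldl (fun temp n =>
    if PySem.List.pyGetD resids n 0 == i && PySem.List.pyGetD residues n "" == "ALA" && PySem.List.pyGetD atoms n "" == "H" then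
      temp ++ [PySem.List.pyGetD indexes n 0]
    else if PySem.List.pyGetD resids n 0 == i && PySem.List.pyGetD residues n "" == "NMA" && PySem.List.pyGetD atoms n "" == "CN" then
      temp ++ [PySem.List.pyGetD indexes n 0]
    else temp) temp

-- the second/third/fourth inner loops of A, which differ only in the atom name s
def pvLoopAtom (resids : List Int) (residues : List String) (atoms : List String) (indexes : List Int) (s : String) (i : Int) (temp : List Int) : List Int :=
  (PySem.List.pyRange 0 (residues.length : Int) 1).foldl (fun temp n =>
    if PySem.List.pyGetD resids n 0 == i && PySem.List.pyGetD atoms n "" == s then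
      temp ++ [PySem.List.pyGetD indexes n 0]
    else temp) temp

def get_phiP (num_res : Int) (resids : List Int) (residues : List String) (atoms : List String) (indexes : List Int) : List (List Int) :=
  (PySem.List.pyRange 1 (num_res + 1) 1).foldl (fun phiP i =>
    phiP ++ [pvLoopAtom resids residues atoms indexes "C" i
              (pvLoopAtom resids residues atoms indexes "CA" i
                (pvLoopAtom resids residues atoms indexes "N" i
                  (pvLoop1 resids residues atoms indexes i [])))]) []

-- ===== PORT B =====
-- one bucketing step: route the atom's index into one of the four ordered category lists of its resid
def pvStep (d : PySem.Dict Int (List Int × List Int × List Int × List Int)) (q : Int × String × String × Int) : PySem.Dict Int (List Int × List Int × List Int × List Int) :=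
  d.modify q.1 ([], [], [], []) (fun b =>
    if (q.2.1 == "ALA" && q.2.2.1 == "H") || (q.2.1 == "NMA" && q.2.2.1 == "CN") then
      (b.1 ++ [q.2.2.2], b.2.1, b.2.2.1, b.2.2.2)
    else if q.2.2.1 == "N" then (b.1, b.2.1 ++ [q.2.2.2], b.2.2.1, b.2.2.2)
    else if q.2.2.1 == "CA" then (b.1, b.2.1, b.2.2.1 ++ [q.2.2.2], b.2.2.2)
    else if q.2.2.1 == "C" then (b.1, b.2.1, b.2.2.1, b.2.2.2 ++ [q.2.2.2])
    else b)

def get_phiP_alt (num_res : Int) (resids : List Int) (residues : List String) (atoms : List String) (indexes : List Int) : List (List Int) :=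
  let buckets := (resids.zip (residues.zip (atoms.zip indexes))).foldl pvStep PySem.Dict.empty
  (PySem.List.pyRange 1 (num_res + 1) 1).map (fun i =>
    let b := buckets.getD i ([], [], [], [])
    b.1 ++ b.2.1 ++ b.2.2.1 ++ b.2.2.2)

-- ===== PRECONDITION & SPEC =====
-- Pre_ excludes the inputs where A raises IndexError (a parallel list shorter than residues while the
-- outer loop runs); it is slightly narrower than A's exact return set: it also excludes some
-- length-mismatched inputs on which A happens to return because no executed access reaches the short
-- list (see the cite in claim.json; A and B agree there anyway).
def Pre_get_phiP (num_res : Int) (resids : List Int) (residues : List String) (atoms : List String) (indexes : List Int) : Prop :=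
  num_res ≤ 0 ∨ (residues.length ≤ resids.length ∧ residues.length ≤ atoms.length ∧ residues.length ≤ indexes.length)
instance (num_res : Int) (resids : List Int) (residues : List String) (atoms : List String) (indexes : List Int) : Decidable (Pre_get_phiP num_res resids residues atoms indexes) := by unfold Pre_get_phiP; infer_instance

def pvWitness_get_phiP : Int × List Int × List String × List String × List Int :=
  (2, [1, 1, 1, 2], ["ALA", "ALA", "ALA", "NMA"], ["N", "CA", "C", "CN"], [10, 11, 12, 13])

def Spec_get_phiP (num_res : Int) (resids : List Int) (residues : List String) (atoms : List String) (indexes : List Int) (out : List (List Int)) : Prop := out = get_phiP_alt num_res resids residues atoms indexes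
instance (num_res : Int) (resids : List Int) (residues : List String) (atoms : List String) (indexes : List Int) (out : List (List Int)) : Decidable (Spec_get_phiP num_res resids residues atoms indexes out) := by unfold Spec_get_phiP; infer_instance

-- ===== CLAIM (what is proved, stated in full; the proofs are below) =====
def Claim_equal_get_phiP : Prop := ∀ (num_res : Int) (resids : List Int) (residues : List String) (atoms : List String) (indexes : List Int), Dom_get_phiP num_res resids residues atoms indexes → Pre_get_phiP num_res resids residues atoms indexes → Spec_get_phiP num_res resids residues atoms indexes (get_phiP num_res resids residues atoms indexes)

-- ===== LEMMAS AND PROOFS =====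

-- selection of the indexes of the atoms of residue i that satisfy p, in input order
def pvSel (i : Int) (p : Int × String × String × Int → Bool) (L : List (Int × String × String × Int)) : List Int :=
  (L.filter (fun q => q.1 == i && p q)).map (fun q => q.2.2.2)

def pvP0 (q : Int × String × String × Int) : Bool :=
  (q.2.1 == "ALA" && q.2.2.1 == "H") || (q.2.1 == "NMA" && q.2.2.1 == "CN")

-- one bucketing step, seen through getD
lemma pv_step_getD (d : PySem.Dict Int (List Int × List Int × List Int × List Int))
    (q : Int × String × String × Int) (i : Int) :
    (pvStep d q).getD i ([], [], [], []) =
      ((d.getD i ([], [], [], [])).1 ++ (if q.1 == i && pvP0 q then [q.2.2.2] else []),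
       (d.getD i ([], [], [], [])).2.1 ++ (if q.1 == i && q.2.2.1 == "N" then [q.2.2.2] else []),
       (d.getD i ([], [], [], [])).2.2.1 ++ (if q.1 == i && q.2.2.1 == "CA" then [q.2.2.2] else []),
       (d.getD i ([], [], [], [])).2.2.2 ++ (if q.1 == i && q.2.2.1 == "C" then [q.2.2.2] else [])) := by
  unfold pvStep
  rw [PySem.Dict.getD_modify]
  by_cases hk : i = q.1
  · subst hk
    simp only [pvP0, beq_self_eq_true, Bool.true_and]
    by_cases h0 : (q.2.1 == "ALA" && q.2.2.1 == "H" || q.2.1 == "NMA" && q.2.2.1 == "CN") = true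
    · have h0' := h0
      simp only [Bool.or_eq_true, Bool.and_eq_true, beq_iff_eq] at h0'
      rcases h0' with ⟨hA, h⟩ | ⟨hA, h⟩ <;> simp [h, hA]
    · by_cases hN : (q.2.2.1 == "N") = true
      · simp only [beq_iff_eq] at hN; simp [hN]
      · by_cases hCA : (q.2.2.1 == "CA") = true
        · simp only [beq_iff_eq] at hCA; simp [hCA]
        · by_cases hC : (q.2.2.1 == "C") = true
          · simp only [beq_iff_eq] at hC; simp [hC]
          · simp [h0, hN, hCA, hC]
  · have hb : (q.1 == i) = false := by
      simp only [beq_eq_false_iff_ne]; exact fun h => hk h.symm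
    simp [if_neg hk, hb]

-- the bucket of residue i after the whole bucketing pass
lemma pv_bucket (L : List (Int × String × String × Int)) :
    ∀ (d : PySem.Dict Int (List Int × List Int × List Int × List Int)) (i : Int),
    (L.foldl pvStep d).getD i ([], [], [], []) =
      ((d.getD i ([], [], [], [])).1 ++ pvSel i pvP0 L,
       (d.getD i ([], [], [], [])).2.1 ++ pvSel i (fun q => q.2.2.1 == "N") L,
       (d.getD i ([], [], [], [])).2.2.1 ++ pvSel i (fun q => q.2.2.1 == "CA") L,
       (d.getD i ([], [], [], [])).2.2.2 ++ pvSel i (fun q => q.2.2.1 == "C") L) := by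
  induction L with
  | nil => intro d i; simp [pvSel]
  | cons q L ih =>
    intro d i
    rw [List.foldl_cons, ih, pv_step_getD]
    simp only [pvSel, List.filter_cons]
    split_ifs with h0 h1 h2 h3 <;> simp_all [List.append_assoc]

-- A's atom-name loops compute the corresponding selection
lemma pv_loopAtom_eq (resids : List Int) (residues : List String) (atoms : List String)
    (indexes : List Int) (s : String) (i : Int) (temp : List Int)
    (h1 : residues.length ≤ resids.length) (h2 : residues.length ≤ atoms.length)
    (h3 : residues.length ≤ indexes.length) :
    pvLoopAtom resids residues atoms indexes s i temp =
      temp ++ pvSel i (fun q => q.2.2.1 == s) (resids.zip (residues.zip (atoms.zip indexes))) := by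
  set L := resids.zip (residues.zip (atoms.zip indexes)) with hLdef
  have hL : L.length = residues.length := by
    simp only [hLdef, List.length_zip]; omega
  unfold pvLoopAtom
  have hcast : (residues.length : Int) = (L.length : Int) := by rw [hL]
  rw [hcast]
  have hcong := PySem.List.foldl_congr_mem (PySem.List.pyRange 0 ((L.length : Int)) 1)
    (fun temp n =>
      if PySem.List.pyGetD resids n 0 == i && PySem.List.pyGetD atoms n "" == s then
        temp ++ [PySem.List.pyGetD indexes n 0]
      else temp)
    (fun temp n =>
      if (PySem.List.pyGetD L n ((0 : Int), ("" : String), ("" : String), (0 : Int))).1 == i &&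
         (PySem.List.pyGetD L n ((0 : Int), ("" : String), ("" : String), (0 : Int))).2.2.1 == s then
        temp ++ [(PySem.List.pyGetD L n ((0 : Int), ("" : String), ("" : String), (0 : Int))).2.2.2]
      else temp)
    temp
    (by
      intro acc n hn
      rw [PySem.List.mem_pyRange_one] at hn
      have hn0 : 0 ≤ n := hn.1
      have hnL : n.toNat < L.length := by omega
      have hq : PySem.List.pyGetD L n ((0 : Int), ("" : String), ("" : String), (0 : Int)) = L[n.toNat]'hnL :=
        PySem.List.pyGetD_eq_getElem L _ hn0 (by omega)
      have hres : PySem.List.pyGetD resids n 0 = resids[n.toNat]'(by omega) :=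
        PySem.List.pyGetD_eq_getElem resids 0 hn0 (by omega)
      have hatm : PySem.List.pyGetD atoms n "" = atoms[n.toNat]'(by omega) :=
        PySem.List.pyGetD_eq_getElem atoms "" hn0 (by omega)
      have hidx : PySem.List.pyGetD indexes n 0 = indexes[n.toNat]'(by omega) :=
        PySem.List.pyGetD_eq_getElem indexes 0 hn0 (by omega)
      simp only [hq, hres, hatm, hidx]
      simp only [hLdef, List.getElem_zip])
  rw [hcong,
    PySem.List.foldl_pyRange_zero_pyGetD' L ((0 : Int), ("" : String), ("" : String), (0 : Int))
      (fun acc q => if q.1 == i && q.2.2.1 == s then acc ++ [q.2.2.2] else acc) temp,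
    PySem.List.foldl_append_if (fun q => q.1 == i && q.2.2.1 == s) (fun q => q.2.2.2) L temp]
  simp [pvSel]

-- A's first loop (if/elif) computes the pvP0 selection
lemma pv_loop1_eq (resids : List Int) (residues : List String) (atoms : List String)
    (indexes : List Int) (i : Int) (temp : List Int)
    (h1 : residues.length ≤ resids.length) (h2 : residues.length ≤ atoms.length)
    (h3 : residues.length ≤ indexes.length) :
    pvLoop1 resids residues atoms indexes i temp =
      temp ++ pvSel i pvP0 (resids.zip (residues.zip (atoms.zip indexes))) := by
  set L := resids.zip (residues.zip (atoms.zip indexes)) with hLdef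
  have hL : L.length = residues.length := by
    simp only [hLdef, List.length_zip]; omega
  unfold pvLoop1
  have hcast : (residues.length : Int) = (L.length : Int) := by rw [hL]
  rw [hcast]
  have hcong := PySem.List.foldl_congr_mem (PySem.List.pyRange 0 ((L.length : Int)) 1)
    (fun temp n =>
      if PySem.List.pyGetD resids n 0 == i && PySem.List.pyGetD residues n "" == "ALA" && PySem.List.pyGetD atoms n "" == "H" then
        temp ++ [PySem.List.pyGetD indexes n 0]
      else if PySem.List.pyGetD resids n 0 == i && PySem.List.pyGetD residues n "" == "NMA" && PySem.List.pyGetD atoms n "" == "CN" then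
        temp ++ [PySem.List.pyGetD indexes n 0]
      else temp)
    (fun temp n =>
      if (PySem.List.pyGetD L n ((0 : Int), ("" : String), ("" : String), (0 : Int))).1 == i &&
         pvP0 (PySem.List.pyGetD L n ((0 : Int), ("" : String), ("" : String), (0 : Int))) then
        temp ++ [(PySem.List.pyGetD L n ((0 : Int), ("" : String), ("" : String), (0 : Int))).2.2.2]
      else temp)
    temp
    (by
      intro acc n hn
      rw [PySem.List.mem_pyRange_one] at hn
      have hn0 : 0 ≤ n := hn.1
      have hnL : n.toNat < L.length := by omega
      have hq : PySem.List.pyGetD L n ((0 : Int), ("" : String), ("" : String), (0 : Int)) = L[n.toNat]'hnL :=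
        PySem.List.pyGetD_eq_getElem L _ hn0 (by omega)
      have hres : PySem.List.pyGetD resids n 0 = resids[n.toNat]'(by omega) :=
        PySem.List.pyGetD_eq_getElem resids 0 hn0 (by omega)
      have hrsd : PySem.List.pyGetD residues n "" = residues[n.toNat]'(by omega) :=
        PySem.List.pyGetD_eq_getElem residues "" hn0 (by omega)
      have hatm : PySem.List.pyGetD atoms n "" = atoms[n.toNat]'(by omega) :=
        PySem.List.pyGetD_eq_getElem atoms "" hn0 (by omega)
      have hidx : PySem.List.pyGetD indexes n 0 = indexes[n.toNat]'(by omega) :=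
        PySem.List.pyGetD_eq_getElem indexes 0 hn0 (by omega)
      simp only [hq, hres, hrsd, hatm, hidx]
      simp only [hLdef, List.getElem_zip, pvP0]
      cases hA : (resids[n.toNat]'(by omega) == i) <;>
        cases hB : (residues[n.toNat]'(by omega) == "ALA") <;>
        cases hC : (atoms[n.toNat]'(by omega) == "H") <;>
        cases hD : (residues[n.toNat]'(by omega) == "NMA") <;>
        cases hE : (atoms[n.toNat]'(by omega) == "CN") <;>
        simp_all)
  rw [hcong,
    PySem.List.foldl_pyRange_zero_pyGetD' L ((0 : Int), ("" : String), ("" : String), (0 : Int))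
      (fun acc q => if q.1 == i && pvP0 q then acc ++ [q.2.2.2] else acc) temp,
    PySem.List.foldl_append_if (fun q => q.1 == i && pvP0 q) (fun q => q.2.2.2) L temp]
  simp [pvSel]

-- ===== VERDICT (by name: the statement is the Claim_ definition above) =====
theorem get_phiP_spec : Claim_equal_get_phiP := by
  intro num_res resids residues atoms indexes _dom hpre
  unfold Spec_get_phiP
  rcases hpre with hnr | ⟨h1, h2, h3⟩
  · have hnil : PySem.List.pyRange 1 (num_res + 1) 1 = [] :=
      PySem.List.pyRange_one_eq_nil (by omega)
    simp [get_phiP, get_phiP_alt, hnil]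
  · unfold get_phiP get_phiP_alt
    rw [PySem.List.foldl_append_singleton_eq_map]
    simp only [List.nil_append]
    apply List.map_congr_left
    intro i _
    rw [pv_loop1_eq resids residues atoms indexes i [] h1 h2 h3,
        pv_loopAtom_eq resids residues atoms indexes "N" i _ h1 h2 h3,
        pv_loopAtom_eq resids residues atoms indexes "CA" i _ h1 h2 h3,
        pv_loopAtom_eq resids residues atoms indexes "C" i _ h1 h2 h3,
        pv_bucket]
    simp [PySem.Dict.getD_empty, List.append_assoc]
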